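-- pv_equiv track=rewrite | github.com/evotools/CattleGraphGenomePaper | detectSequences/SCRIPTS/MAFtoCoverage.py | getRefQuery
-- ===== SOURCE A (Python) =====
-- def getRefQuery(lines, rname, seq, ignoreself):
--     if seq is not None:
--         references = [line for line in lines if seq in line]
--         if ignoreself:
--             queries = [line for line in lines if seq not in line and rname not in line]
--         else:
--             queries = [line for line in lines if seq not in line]
--     else:
--         references = [line for line in lines if rname in line]
--         queries = [line for line in lines if rname not in line]
--     return references, queries
-- ===== SOURCE B (Python) =====
-- def getRefQuery(lines, rname, seq, ignoreself):
--     # single pass: classify each line once instead of 2-3 filtered comprehensions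
--     references, queries = [], []
--     for line in lines:
--         if seq is not None:
--             if seq in line:
--                 references.append(line)
--             elif not (ignoreself and rname in line):
--                 queries.append(line)
--         else:
--             if rname in line:
--                 references.append(line)
--             else:
--                 queries.append(line)
--     return references, queries
-- ===== Notes on version B (the rewrite author's own statement) =====
-- stated objective: alternative
-- what changed: B classifies each line in a single pass maintaining two accumulator lists, instead of A's two or three separate filtered comprehensions that each re-scan all lines.
import Mathlib
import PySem

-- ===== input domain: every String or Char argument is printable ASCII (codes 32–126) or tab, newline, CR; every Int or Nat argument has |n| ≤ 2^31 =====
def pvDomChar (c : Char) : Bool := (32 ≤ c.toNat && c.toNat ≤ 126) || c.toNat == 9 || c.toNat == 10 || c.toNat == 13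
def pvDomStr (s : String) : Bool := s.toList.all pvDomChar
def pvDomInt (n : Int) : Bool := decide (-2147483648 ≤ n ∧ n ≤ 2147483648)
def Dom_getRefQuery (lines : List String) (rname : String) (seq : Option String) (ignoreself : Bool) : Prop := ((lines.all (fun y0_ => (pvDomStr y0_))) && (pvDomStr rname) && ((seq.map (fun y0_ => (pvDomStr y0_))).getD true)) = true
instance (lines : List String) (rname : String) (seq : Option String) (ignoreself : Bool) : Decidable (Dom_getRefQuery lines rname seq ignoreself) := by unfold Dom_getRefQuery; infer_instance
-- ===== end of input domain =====

-- B replaces A's two/three filtered comprehensions by a single classifying pass (one scan, two accumulators).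

-- ===== PORT A =====
def getRefQuery (lines : List String) (rname : String) (seq : Option String) (ignoreself : Bool) : List String × List String :=
  match seq with
  | some s =>
      let references := lines.filter (fun line => PySem.Str.isIn s line)
      let queries :=
        if ignoreself then
          lines.filter (fun line => !PySem.Str.isIn s line && !PySem.Str.isIn rname line)
        else
          lines.filter (fun line => !PySem.Str.isIn s line)
      (references, queries)
  | none =>
      (lines.filter (fun line => PySem.Str.isIn rname line),
       lines.filter (fun line => !PySem.Str.isIn rname line))

-- ===== PORT B =====
def getRefQueryStep (rname : String) (seq : Option String) (ignoreself : Bool)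
    (acc : List String × List String) (line : String) : List String × List String :=
  match seq with
  | some s =>
      if PySem.Str.isIn s line then (acc.1 ++ [line], acc.2)
      else if !(ignoreself && PySem.Str.isIn rname line) then (acc.1, acc.2 ++ [line])
      else acc
  | none =>
      if PySem.Str.isIn rname line then (acc.1 ++ [line], acc.2)
      else (acc.1, acc.2 ++ [line])

def getRefQuery_alt (lines : List String) (rname : String) (seq : Option String) (ignoreself : Bool) : List String × List String :=
  lines.foldl (getRefQueryStep rname seq ignoreself) ([], [])

-- ===== PRECONDITION & SPEC =====
def Spec_getRefQuery (lines : List String) (rname : String) (seq : Option String) (ignoreself : Bool) (out : List String × List String) : Prop := out = getRefQuery_alt lines rname seq ignoreself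
instance (lines : List String) (rname : String) (seq : Option String) (ignoreself : Bool) (out : List String × List String) : Decidable (Spec_getRefQuery lines rname seq ignoreself out) := by unfold Spec_getRefQuery; infer_instance

-- ===== CLAIM (what is proved, stated in full; the proofs are below) =====
def Claim_equal_getRefQuery : Prop := ∀ (lines : List String) (rname : String) (seq : Option String) (ignoreself : Bool), Dom_getRefQuery lines rname seq ignoreself → Spec_getRefQuery lines rname seq ignoreself (getRefQuery lines rname seq ignoreself)

-- ===== LEMMAS AND PROOFS =====
-- B's classifying fold, for arbitrary tests p (goes to .1) and r (else-if, goes to .2),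
-- equals the pair of A-style filters.
theorem foldl_classify (p r : String → Bool) (lines : List String) (acc : List String × List String) :
    lines.foldl
      (fun acc line =>
        if p line then (acc.1 ++ [line], acc.2)
        else if r line then (acc.1, acc.2 ++ [line]) else acc) acc
    = (acc.1 ++ lines.filter p, acc.2 ++ lines.filter (fun l => !p l && r l)) := by
  induction lines generalizing acc with
  | nil => simp
  | cons x xs ih =>
      simp only [List.foldl_cons, List.filter_cons]
      by_cases hp : p x
      · simp [hp, ih]
      · by_cases hr : r x
        · simp [hp, hr, ih]
        · simp [hp, hr, ih]

-- ===== VERDICT (by name: the statement is the Claim_ definition above) =====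
theorem getRefQuery_spec : Claim_equal_getRefQuery := by
  intro lines rname seq ignoreself _
  unfold Spec_getRefQuery getRefQuery getRefQuery_alt getRefQueryStep
  cases seq with
  | none =>
      have h := foldl_classify (fun line => PySem.Str.isIn rname line) (fun _ => true)
        lines ([], [])
      simp only [if_true, Bool.and_true] at h
      simp only
      rw [h]
      simp
  | some s =>
      cases ignoreself with
      | false =>
          have h := foldl_classify (fun line => PySem.Str.isIn s line) (fun _ => true)
            lines ([], [])
          simp only [if_true, Bool.and_true] at h
          simp only [Bool.false_and, Bool.not_false, if_true]
          rw [h]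
          simp
      | true =>
          have h := foldl_classify (fun line => PySem.Str.isIn s line)
            (fun line => !PySem.Str.isIn rname line) lines ([], [])
          simp only [Bool.true_and, if_true]
          rw [h]
          simp
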